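-- pv_equiv track=rewrite | github.com/mesumitkumarsk/GUVI-codekata | gu-functional-programming-unit-3/Q14-In an e-commerce application, you have a list of n products/get_products_in_budget.py | get_products_in_budget
-- ===== SOURCE A (Python) =====
-- def get_products_in_budget(budget, products):
--     #..... YOUR CODE STARTS HERE .....
--
--     sorted_products = sorted(products, key=lambda x : x[1])
--
--     current_total = 0
--
--     for product in sorted_products:
--         product_id, price = product
--         if current_total + price <= budget:
--             yield product
--             current_total += price
--         else:
--             break
-- ===== SOURCE B (Python) =====
-- def get_products_in_budget(budget, products):
--     # Build a prefix-sum table over the sorted prices, then yield while the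
--     # cumulative total stays within budget (same order and inclusive <= as A).
--     sorted_products = sorted(products, key=lambda p: p[1])
--     totals = []
--     t = 0
--     for _, price in sorted_products:
--         t += price
--         totals.append(t)
--     for product, total in zip(sorted_products, totals):
--         if total > budget:
--             break
--         yield product
-- ===== Notes on version B (the rewrite author's own statement) =====
-- stated objective: alternative
-- what changed: Replaces the interleaved accumulate-and-branch loop with a two-phase decomposition: build a prefix-sum table over the sorted prices, then yield products while their cumulative total is within budget.
import Mathlib
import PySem

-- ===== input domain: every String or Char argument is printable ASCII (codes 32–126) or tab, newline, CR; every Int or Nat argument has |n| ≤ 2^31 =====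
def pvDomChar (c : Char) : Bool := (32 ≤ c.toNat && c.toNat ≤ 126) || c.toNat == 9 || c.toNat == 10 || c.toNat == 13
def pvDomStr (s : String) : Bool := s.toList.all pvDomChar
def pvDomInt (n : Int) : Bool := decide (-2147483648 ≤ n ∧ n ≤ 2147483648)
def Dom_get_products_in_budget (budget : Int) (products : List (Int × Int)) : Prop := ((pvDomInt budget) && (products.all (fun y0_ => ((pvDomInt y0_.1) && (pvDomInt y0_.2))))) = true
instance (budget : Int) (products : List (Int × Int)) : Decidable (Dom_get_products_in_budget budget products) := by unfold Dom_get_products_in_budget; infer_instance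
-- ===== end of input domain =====

-- B rebuilds A's single accumulate-and-break loop as "prefix-sum table, then take-while" (alternative decomposition, same cost).
-- Both programs are generators in Python; the equivalence is about the yielded sequence as a list.
-- ===== PORT A =====
def pvLoopA (budget current_total : Int) : List (Int × Int) → List (Int × Int)
  | [] => []
  | product :: rest =>
      if current_total + product.2 ≤ budget then
        product :: pvLoopA budget (current_total + product.2) rest
      else []

def get_products_in_budget (budget : Int) (products : List (Int × Int)) : List (Int × Int) :=
  pvLoopA budget 0 (PySem.List.sorted products (fun x => x.2))

-- ===== PORT B =====
def pvPrefixB (t : Int) : List (Int × Int) → List Int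
  | [] => []
  | p :: rest => (t + p.2) :: pvPrefixB (t + p.2) rest

def pvTakeB (budget : Int) : List ((Int × Int) × Int) → List (Int × Int)
  | [] => []
  | (product, total) :: rest =>
      if total > budget then [] else product :: pvTakeB budget rest

def get_products_in_budget_alt (budget : Int) (products : List (Int × Int)) : List (Int × Int) :=
  let sorted_products := PySem.List.sorted products (fun p => p.2)
  pvTakeB budget (sorted_products.zip (pvPrefixB 0 sorted_products))

-- ===== PRECONDITION & SPEC =====
def Spec_get_products_in_budget (budget : Int) (products : List (Int × Int)) (out : List (Int × Int)) : Prop := out = get_products_in_budget_alt budget products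
instance (budget : Int) (products : List (Int × Int)) (out : List (Int × Int)) : Decidable (Spec_get_products_in_budget budget products out) := by unfold Spec_get_products_in_budget; infer_instance

-- ===== CLAIM (what is proved, stated in full; the proofs are below) =====
def Claim_equal_get_products_in_budget : Prop := ∀ (budget : Int) (products : List (Int × Int)), Dom_get_products_in_budget budget products → Spec_get_products_in_budget budget products (get_products_in_budget budget products)

-- ===== LEMMAS AND PROOFS =====
theorem pvLoop_eq_take (budget : Int) : ∀ (l : List (Int × Int)) (c : Int),
    pvLoopA budget c l = pvTakeB budget (l.zip (pvPrefixB c l)) := by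
  intro l
  induction l with
  | nil => intro c; rfl
  | cons p rest ih =>
      intro c
      simp only [pvLoopA, pvPrefixB, List.zip_cons_cons, pvTakeB]
      by_cases h : c + p.2 ≤ budget
      · rw [if_pos h, if_neg (by omega), ih]
      · rw [if_neg h, if_pos (by omega)]

-- ===== VERDICT (by name: the statement is the Claim_ definition above) =====
theorem get_products_in_budget_spec : Claim_equal_get_products_in_budget := by
  intro budget products _
  unfold Spec_get_products_in_budget get_products_in_budget get_products_in_budget_alt
  exact pvLoop_eq_take budget _ 0
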